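-- pv_equiv track=rewrite | github.com/chadwellwalker/Snipewins | player_hub.py | _count_title_matches
-- ===== SOURCE A (Python) =====
-- from typing import Any, Callable, Dict, List, Optional, Set, Tuple
--
-- def _count_title_matches(items: Optional[List[Dict[str, Any]]], seeds: Dict[str, Dict[str, Any]]) -> Dict[str, int]:
--     counts: Dict[str, int] = {}
--     if not items:
--         return counts
--     for item in items:
--         title = (item.get("title") or "").lower()
--         if not title:
--             continue
--         for pid, row in seeds.items():
--             for tok in row.get("match_tokens") or []:
--                 if str(tok).lower() in title:
--                     counts[pid] = counts.get(pid, 0) + 1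
--                     break
--     return counts
-- ===== SOURCE B (Python) =====
-- from typing import Any, Dict, List, Optional
--
--
-- def _count_title_matches(items: Optional[List[Dict[str, Any]]], seeds: Dict[str, Dict[str, Any]]) -> Dict[str, int]:
--     counts: Dict[str, int] = {}
--     if not items:
--         return counts
--     # Inverted index: lowered token -> pids carrying it; each distinct token is
--     # tested against a title once, instead of once per seed that carries it.
--     index: Dict[str, List[str]] = {}
--     order: List[str] = []
--     for pid, row in seeds.items():
--         order.append(pid)
--         for tok in row.get("match_tokens") or []:
--             index.setdefault(str(tok).lower(), []).append(pid)
--     for item in items: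
--         title = (item.get("title") or "").lower()
--         if not title:
--             continue
--         matched = set()
--         for tok, pids in index.items():
--             if tok in title:
--                 matched.update(pids)
--         for pid in order:
--             if pid in matched:
--                 counts[pid] = counts.get(pid, 0) + 1
--     return counts
-- ===== Notes on version B (the rewrite author's own statement) =====
-- stated objective: alternative
-- what changed: B builds an inverted index from lowered token to the pids carrying it, scans each title once over the distinct tokens to collect a matched-pid set, and then increments counters from that set, instead of A's per-item re-scan of every seed's token list with a break.
import Mathlib
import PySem

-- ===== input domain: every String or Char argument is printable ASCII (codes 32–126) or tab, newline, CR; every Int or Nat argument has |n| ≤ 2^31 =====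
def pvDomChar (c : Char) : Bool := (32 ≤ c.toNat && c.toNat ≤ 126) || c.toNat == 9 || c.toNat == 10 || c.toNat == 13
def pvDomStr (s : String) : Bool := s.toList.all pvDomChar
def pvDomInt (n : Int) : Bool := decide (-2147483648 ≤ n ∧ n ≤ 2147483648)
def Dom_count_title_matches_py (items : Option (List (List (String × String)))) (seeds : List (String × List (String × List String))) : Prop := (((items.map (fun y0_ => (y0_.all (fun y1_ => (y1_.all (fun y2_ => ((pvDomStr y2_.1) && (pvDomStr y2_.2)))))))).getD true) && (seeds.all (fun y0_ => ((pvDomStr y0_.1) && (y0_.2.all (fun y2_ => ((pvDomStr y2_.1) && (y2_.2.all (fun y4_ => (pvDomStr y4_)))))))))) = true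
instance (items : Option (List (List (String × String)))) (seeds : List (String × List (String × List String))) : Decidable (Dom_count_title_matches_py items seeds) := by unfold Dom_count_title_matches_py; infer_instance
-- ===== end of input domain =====

-- B replaces A's per-seed token rescans by an inverted index (lowered token -> pids): each distinct token is tested against a title once, then counts are incremented from the matched-pid set; objective: alternative.


-- ===== PORT A =====
-- 'seeds.items()' under the assoc-list convention (first binding wins): the pairs of the Python dict, in insertion order
def pvDictItems {ν : Type} (ps : List (String × ν)) : List (String × ν) :=
  (ps.foldl (fun d pr => d.setdefault pr.1 pr.2) (PySem.Dict.empty : PySem.Dict String ν)).items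

-- inner  'for tok in row.get("match_tokens") or []: if str(tok).lower() in title: …; break'  loop
def pvA_tokLoop (title : String) (pid : String) (toks : List String) (counts : PySem.Dict String Int) : PySem.Dict String Int :=
  match toks with
  | [] => counts
  | tok :: rest =>
      if PySem.Str.isIn (PySem.Str.lower tok) title then
        counts.insert pid (counts.getD pid 0 + 1)
      else pvA_tokLoop title pid rest counts

def count_title_matches_py (items : Option (List (List (String × String)))) (seeds : List (String × List (String × List String))) : List (String × Int) :=
  match items with
  | none => (PySem.Dict.empty : PySem.Dict String Int).items
  | some its =>
      if its.isEmpty then (PySem.Dict.empty : PySem.Dict String Int).items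
      else
        (its.foldl (fun counts item =>
            let title := PySem.Str.lower ((PySem.Dict.mk item).getD "title" "")
            if title = "" then counts
            else (pvDictItems seeds).foldl (fun c pr =>
                pvA_tokLoop title pr.1 ((PySem.Dict.mk pr.2).getD "match_tokens" []) c) counts)
          PySem.Dict.empty).items

-- ===== PORT B =====
def count_title_matches_py_alt (items : Option (List (List (String × String)))) (seeds : List (String × List (String × List String))) : List (String × Int) :=
  match items with
  | none => (PySem.Dict.empty : PySem.Dict String Int).items
  | some its =>
      if its.isEmpty then (PySem.Dict.empty : PySem.Dict String Int).items
      else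
        let rows := pvDictItems seeds
        -- index.setdefault(str(tok).lower(), []).append(pid)  ==  modify tok [] (· ++ [pid])
        let index := rows.foldl (fun ix pr =>
            ((PySem.Dict.mk pr.2).getD "match_tokens" []).foldl (fun ix tok =>
              ix.modify (PySem.Str.lower tok) [] (fun l => l ++ [pr.1])) ix)
          (PySem.Dict.empty : PySem.Dict String (List String))
        let order := rows.map (fun pr => pr.1)
        (its.foldl (fun counts item =>
            let title := PySem.Str.lower ((PySem.Dict.mk item).getD "title" "")
            if title = "" then counts
            else
              let matched := index.items.foldl (fun m e =>
                  if PySem.Str.isIn e.1 title then PySem.Set.update m e.2 else m)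
                (PySem.Set.empty : PySem.Set String)
              order.foldl (fun c pid =>
                  if PySem.Set.contains matched pid then c.insert pid (c.getD pid 0 + 1) else c) counts)
          PySem.Dict.empty).items

-- ===== PRECONDITION & SPEC =====
def Spec_count_title_matches_py (items : Option (List (List (String × String)))) (seeds : List (String × List (String × List String))) (out : List (String × Int)) : Prop := out = count_title_matches_py_alt items seeds
instance (items : Option (List (List (String × String)))) (seeds : List (String × List (String × List String))) (out : List (String × Int)) : Decidable (Spec_count_title_matches_py items seeds out) := by unfold Spec_count_title_matches_py; infer_instance

-- ===== CLAIM (what is proved, stated in full; the proofs are below) =====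
def Claim_equal_count_title_matches_py : Prop := ∀ (items : Option (List (List (String × String)))) (seeds : List (String × List (String × List String))), Dom_count_title_matches_py items seeds → Spec_count_title_matches_py items seeds (count_title_matches_py items seeds)

-- ===== LEMMAS AND PROOFS =====

-- row's lowered token list, and the flattened (lowered token, pid) pair list of the index
def pvToks (row : List (String × List String)) : List String :=
  (PySem.Dict.mk row).getD "match_tokens" []

def pvFlat (rows : List (String × List (String × List String))) : List (String × String) :=
  rows.flatMap (fun pr => (pvToks pr.2).map (fun t => (PySem.Str.lower t, pr.1)))

-- A's break-loop over the tokens equals an any()-guarded single increment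
theorem pvA_tokLoop_eq (title pid : String) (toks : List String) (counts : PySem.Dict String Int) :
    pvA_tokLoop title pid toks counts
      = if toks.any (fun t => PySem.Str.isIn (PySem.Str.lower t) title) then
          counts.insert pid (counts.getD pid 0 + 1)
        else counts := by
  induction toks with
  | nil => simp [pvA_tokLoop]
  | cons t rest ih =>
      simp only [pvA_tokLoop, List.any_cons]
      rw [ih]
      simp only [Bool.or_eq_true, List.any_eq_true]
      have key : ∀ (p q : Prop) [Decidable p] [Decidable q] (X Y : PySem.Dict String Int),
          (if p then X else if q then X else Y) = if p ∨ q then X else Y := by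
        intro p q _ _ X Y
        by_cases hp : p
        · simp [hp]
        · simp [hp]
      exact key _ _ _ _

-- the setdefault fold keeps the keys unique, hence pvDictItems has pairwise-distinct first components
theorem pv_nodup_setdefault {ν : Type} (ps : List (String × ν)) (d : PySem.Dict String ν)
    (h : d.keys.Nodup) :
    (ps.foldl (fun d pr => d.setdefault pr.1 pr.2) d).keys.Nodup := by
  induction ps generalizing d with
  | nil => exact h
  | cons pr rest ih =>
      simp only [List.foldl_cons]
      cases hc : d.contains pr.1 with
      | true => rw [PySem.Dict.setdefault_of_contains d pr.2 hc]; exact ih d h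
      | false =>
          rw [PySem.Dict.setdefault_of_not_contains d pr.2 hc]
          exact ih _ (PySem.Dict.nodup_keys_insert d pr.1 pr.2 h)

theorem pv_nodup_rows {ν : Type} (ps : List (String × ν)) :
    ((pvDictItems ps).map (fun pr => pr.1)).Nodup := by
  have := pv_nodup_setdefault ps PySem.Dict.empty PySem.Dict.nodup_keys_empty
  simpa [PySem.Dict.keys, pvDictItems] using this

-- B's nested index-building fold is the flat fold over pvFlat
theorem pv_index_eq_flat (rows : List (String × List (String × List String))) :
    rows.foldl (fun ix pr =>
        (pvToks pr.2).foldl (fun ix tok =>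
          ix.modify (PySem.Str.lower tok) [] (fun l => l ++ [pr.1])) ix)
      (PySem.Dict.empty : PySem.Dict String (List String))
    = (pvFlat rows).foldl (fun d p => d.modify p.1 [] (fun l => l ++ [p.2]))
        (PySem.Dict.empty : PySem.Dict String (List String)) := by
  rw [pvFlat, List.foldl_flatMap]
  simp [List.foldl_map]

-- membership in the matched-set fold
theorem pv_mem_matchedFold (l : List (String × List String)) (title pid : String)
    (m0 : PySem.Set String) :
    pid ∈ l.foldl (fun m e => if PySem.Str.isIn e.1 title then PySem.Set.update m e.2 else m) m0
      ↔ pid ∈ m0 ∨ ∃ e ∈ l, PySem.Str.isIn e.1 title = true ∧ pid ∈ e.2 := by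
  induction l generalizing m0 with
  | nil => simp
  | cons e rest ih =>
      simp only [List.foldl_cons]
      by_cases h : PySem.Str.isIn e.1 title = true
      · rw [if_pos h, ih]
        simp only [PySem.Set.mem_update, List.mem_cons]
        constructor
        · rintro (⟨hm | hm⟩ | ⟨e', he', h1, h2⟩)
          · exact Or.inl hm
          · exact Or.inr ⟨e, Or.inl rfl, h, hm⟩
          · exact Or.inr ⟨e', Or.inr he', h1, h2⟩
        · rintro (hm | ⟨e', (rfl | he'), h1, h2⟩)
          · exact Or.inl (Or.inl hm)
          · exact Or.inl (Or.inr h2)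
          · exact Or.inr ⟨e', he', h1, h2⟩
      · rw [if_neg h, ih]
        simp only [List.mem_cons]
        constructor
        · rintro (hm | ⟨e', he', h1, h2⟩)
          · exact Or.inl hm
          · exact Or.inr ⟨e', Or.inr he', h1, h2⟩
        · rintro (hm | ⟨e', (rfl | he'), h1, h2⟩)
          · exact Or.inl hm
          · exact absurd h1 h
          · exact Or.inr ⟨e', he', h1, h2⟩

-- the index seen as a dict, and its lookup table
def pvIndex (seeds : List (String × List (String × List String))) : PySem.Dict String (List String) :=
  (pvDictItems seeds).foldl (fun ix pr =>
      (pvToks pr.2).foldl (fun ix tok =>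
        ix.modify (PySem.Str.lower tok) [] (fun l => l ++ [pr.1])) ix)
    (PySem.Dict.empty : PySem.Dict String (List String))

theorem pv_index_getD (seeds : List (String × List (String × List String))) (c : String) :
    (pvIndex seeds).getD c []
      = ((pvFlat (pvDictItems seeds)).filter (fun p => p.1 == c)).map (fun p => p.2) := by
  rw [pvIndex, pv_index_eq_flat]
  rw [PySem.Dict.getD_foldl_modify_append]
  simp

theorem pv_index_nodup (seeds : List (String × List (String × List String))) :
    (pvIndex seeds).keys.Nodup := by
  rw [pvIndex, pv_index_eq_flat]
  exact PySem.Dict.nodup_keys_foldl_modify_key (pvFlat (pvDictItems seeds)) (fun p => p.1) []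
    (fun _ p => fun l => l ++ [p.2]) PySem.Dict.empty PySem.Dict.nodup_keys_empty

-- membership in pvFlat unpacked
theorem pv_mem_flat (rows : List (String × List (String × List String))) (p : String × String) :
    p ∈ pvFlat rows ↔ ∃ pr ∈ rows, ∃ t ∈ pvToks pr.2, p = (PySem.Str.lower t, pr.1) := by
  simp only [pvFlat, List.mem_flatMap, List.mem_map]
  constructor
  · rintro ⟨pr, hpr, t, ht, rfl⟩
    exact ⟨pr, hpr, t, ht, rfl⟩
  · rintro ⟨pr, hpr, t, ht, rfl⟩
    exact ⟨pr, hpr, t, ht, rfl⟩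

-- for a row of the dict, membership in B's matched set is exactly A's any-token test
theorem pv_matched_iff (seeds : List (String × List (String × List String))) (title : String)
    (pr : String × List (String × List String)) (hpr : pr ∈ pvDictItems seeds) :
    PySem.Set.contains
        ((pvIndex seeds).items.foldl
          (fun m e => if PySem.Str.isIn e.1 title then PySem.Set.update m e.2 else m)
          (PySem.Set.empty : PySem.Set String)) pr.1
      = (pvToks pr.2).any (fun t => PySem.Str.isIn (PySem.Str.lower t) title) := by
  rw [Bool.eq_iff_iff, PySem.Set.contains_iff, pv_mem_matchedFold, List.any_eq_true]
  constructor
  · rintro (hm | ⟨e, he, h1, h2⟩)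
    · simp [PySem.Set.empty] at hm
    · -- e is an index entry whose token matches and lists pr.1
      have hgd := PySem.Dict.getD_of_mem_items (pvIndex seeds) he (pv_index_nodup seeds) []
      rw [pv_index_getD] at hgd
      rw [← hgd] at h2
      simp only [List.mem_map, List.mem_filter] at h2
      obtain ⟨p, ⟨hpf, hpk⟩, hpv⟩ := h2
      rw [pv_mem_flat] at hpf
      obtain ⟨pr', hpr', t, ht, rfl⟩ := hpf
      have : pr' = pr := by
        have hinj := List.inj_on_of_nodup_map (pv_nodup_rows seeds)
        exact hinj hpr' hpr hpv
      subst this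
      refine ⟨t, ht, ?_⟩
      have : PySem.Str.lower t = e.1 := by simpa using hpk
      rwa [this]
  · rintro ⟨t, ht, hmatch⟩
    right
    -- the pair (lower t, pr.1) is in pvFlat, so pr.1 is in the index entry at key (lower t)
    have hflat : (PySem.Str.lower t, pr.1) ∈ pvFlat (pvDictItems seeds) := by
      rw [pv_mem_flat]; exact ⟨pr, hpr, t, ht, rfl⟩
    have hmem : pr.1 ∈ (pvIndex seeds).getD (PySem.Str.lower t) [] := by
      rw [pv_index_getD]
      simp only [List.mem_map, List.mem_filter]
      exact ⟨(PySem.Str.lower t, pr.1), ⟨hflat, by simp⟩, rfl⟩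
    rw [PySem.Dict.getD_eq_get?_getD] at hmem
    cases hg : ((pvIndex seeds).get? (PySem.Str.lower t)) with
    | none => rw [hg] at hmem; simp at hmem
    | some v =>
        rw [hg] at hmem
        exact ⟨(PySem.Str.lower t, v), PySem.Dict.mem_items_of_get?_eq_some _ hg, hmatch, hmem⟩

-- one title step: A's fold over the rows equals B's fold over the pid order
theorem pv_title_step (seeds : List (String × List (String × List String))) (title : String)
    (counts : PySem.Dict String Int) :
    (pvDictItems seeds).foldl (fun c pr => pvA_tokLoop title pr.1 (pvToks pr.2) c) counts
      = ((pvDictItems seeds).map (fun pr => pr.1)).foldl (fun c pid =>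
          if PySem.Set.contains
              ((pvIndex seeds).items.foldl
                (fun m e => if PySem.Str.isIn e.1 title then PySem.Set.update m e.2 else m)
                (PySem.Set.empty : PySem.Set String)) pid
          then c.insert pid (c.getD pid 0 + 1) else c) counts := by
  rw [List.foldl_map]
  apply PySem.List.foldl_congr_mem
  intro acc pr hpr
  rw [pvA_tokLoop_eq, pv_matched_iff seeds title pr hpr]

-- ===== VERDICT (by name: the statement is the Claim_ definition above) =====
theorem count_title_matches_py_spec : Claim_equal_count_title_matches_py := by
  intro items seeds _
  unfold Spec_count_title_matches_py count_title_matches_py count_title_matches_py_alt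
  match items with
  | none => rfl
  | some its =>
      by_cases h : its.isEmpty
      · simp [h]
      · simp only [h, Bool.false_eq_true, if_false]
        congr 1
        apply PySem.List.foldl_congr_mem
        intro acc item _
        by_cases ht : PySem.Str.lower ((PySem.Dict.mk item).getD "title" "") = ""
        · simp [ht]
        · rw [if_neg ht, if_neg ht]
          exact pv_title_step seeds _ acc
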